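-- pv_equiv track=rewrite | github.com/stefanutti/maps-coloring-python | backup/4ct.07-07-2016.py | check_regularity
-- ===== SOURCE A (Python) =====
-- def check_regularity(faces):
--
--     # Return variable
--     #
--     is_three_regular = True
--
--     # get all vertices
--     #
--     vertices = [element for face in faces for edge in face for element in edge]
--     vertices = sorted(set(vertices))
--
--     i_vertex = 0
--     while is_three_regular is True and i_vertex < len(vertices):
--         vertex = vertices[i_vertex]
--         occurrences = [element for face in faces for edge in face for element in edge if element == vertex]
--         if len(occurrences) != 6:
--             is_three_regular = False
--         else:
--             i_vertex += 1
--
--     # Return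
--     #
--     return is_three_regular
-- ===== SOURCE B (Python) =====
-- def check_regularity(faces):
--     # One sort of the full multiset of vertex occurrences, then a single
--     # run-length scan: every maximal run of equal values must have length 6.
--     flat = sorted(e for face in faces for edge in face for e in edge)
--     while flat:
--         v = flat[0]
--         run = 1
--         while run < len(flat) and flat[run] == v:
--             run += 1
--         if run != 6:
--             return False
--         flat = flat[run:]
--     return True
-- ===== Notes on version B (the rewrite author's own statement) =====
-- stated objective: alternative
-- what changed: Replaced A's per-distinct-vertex rescans of the flattened occurrence list with a single sort of the full flattened list followed by one run-length scan checking that every maximal run has length exactly 6.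
import Mathlib
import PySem

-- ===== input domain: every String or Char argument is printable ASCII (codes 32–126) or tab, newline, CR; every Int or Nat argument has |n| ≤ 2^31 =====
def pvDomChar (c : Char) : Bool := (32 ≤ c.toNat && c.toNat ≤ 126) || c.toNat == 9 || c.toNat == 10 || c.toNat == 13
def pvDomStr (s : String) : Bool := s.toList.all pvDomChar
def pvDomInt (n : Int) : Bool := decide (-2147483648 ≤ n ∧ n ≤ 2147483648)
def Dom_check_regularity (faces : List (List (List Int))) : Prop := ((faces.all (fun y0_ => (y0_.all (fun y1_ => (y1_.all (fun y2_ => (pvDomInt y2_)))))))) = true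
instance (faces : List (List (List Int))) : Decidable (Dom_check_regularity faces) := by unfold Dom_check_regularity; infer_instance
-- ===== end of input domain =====

-- B replaces A's per-distinct-vertex rescans of the flattened list with one sort of the
-- full flattened list plus a single run-length scan (alternative algorithm, same value).

-- ===== PORT A =====
-- A's while loop: index i over the sorted distinct vertices; occurrences recomputed per
-- vertex by the filtered triple comprehension; early-exit false on a wrong count.
def aLoop (faces : List (List (List Int))) (vertices : List Int) (i : Nat) : Bool :=
  if h : i < vertices.length then
    if (faces.flatMap (fun face => face.flatMap (fun edge => edge.filter (fun element => element == vertices[i])))).length ≠ 6 then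
      false
    else aLoop faces vertices (i + 1)
  else true
termination_by vertices.length - i

def check_regularity (faces : List (List (List Int))) : Bool :=
  let vertices := faces.flatMap (fun face => face.flatMap (fun edge => edge))
  let vertices := PySem.List.sorted (PySem.Set.ofList vertices) (fun x => x) false
  aLoop faces vertices 0

-- ===== PORT B =====
-- Source B's outer while over the sorted flat list: the inner while computes run = 1 + length
-- of the leading run of flat[0] in the tail; 'flat = flat[run:]' is the dropWhile suffix.
def bScan (flat : List Int) : Bool :=
  match flat with
  | [] => true
  | v :: rest =>
    if 1 + (rest.takeWhile (fun y => y == v)).length ≠ 6 then false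
    else bScan (rest.dropWhile (fun y => y == v))
termination_by flat.length
decreasing_by
  simp only [List.length_cons]
  exact Nat.lt_succ_of_le (List.Sublist.length_le (List.dropWhile_sublist _))

def check_regularity_alt (faces : List (List (List Int))) : Bool :=
  let flat := PySem.List.sorted (faces.flatMap (fun face => face.flatMap (fun edge => edge))) (fun x => x) false
  bScan flat

-- ===== PRECONDITION & SPEC =====
def Spec_check_regularity (faces : List (List (List Int))) (out : Bool) : Prop := out = check_regularity_alt faces
instance (faces : List (List (List Int))) (out : Bool) : Decidable (Spec_check_regularity faces out) := by unfold Spec_check_regularity; infer_instance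

-- ===== CLAIM (what is proved, stated in full; the proofs are below) =====
def Claim_equal_check_regularity : Prop := ∀ (faces : List (List (List Int))), Dom_check_regularity faces → Spec_check_regularity faces (check_regularity faces)

-- ===== LEMMAS AND PROOFS =====

-- the nested filtered comprehension is the filter of the flattened list
theorem occ_eq (faces : List (List (List Int))) (v : Int) :
    faces.flatMap (fun face => face.flatMap (fun edge => edge.filter (fun element => element == v)))
      = (faces.flatMap (fun face => face.flatMap (fun edge => edge))).filter (fun element => element == v) := by
  induction faces with
  | nil => simp
  | cons f t ih =>
    simp only [List.flatMap_cons, List.filter_append, ih]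
    congr 1
    induction f with
    | nil => simp
    | cons e t2 ih2 => simp [ih2]

-- A's loop checks 'count = 6' for every vertex from position i on
theorem aLoop_eq (faces : List (List (List Int))) (vs : List Int) (i : Nat) :
    aLoop faces vs i
      = decide (∀ v ∈ vs.drop i,
          ((faces.flatMap (fun face => face.flatMap (fun edge => edge))).count v) = 6) := by
  fun_induction aLoop faces vs i with
  | case1 i h hne =>
    replace hne : (faces.flatMap (fun face => face.flatMap (fun edge => edge.filter (fun element => element == vs[i])))).length ≠ 6 := by
      simpa using hne
    rw [if_pos hne, eq_comm]
    simp only [decide_eq_false_iff_not]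
    intro hall
    have hv : vs[i] ∈ vs.drop i := by
      rw [List.drop_eq_getElem_cons h]; exact List.mem_cons_self
    rw [occ_eq, ← List.count_eq_length_filter] at hne
    exact hne (hall _ hv)
  | case2 i h hne ih =>
    replace hne : ¬ (faces.flatMap (fun face => face.flatMap (fun edge => edge.filter (fun element => element == vs[i])))).length ≠ 6 := by
      simpa using hne
    rw [if_neg hne, ih, List.drop_eq_getElem_cons h]
    simp only [List.mem_cons, decide_eq_decide]
    rw [occ_eq, ← List.count_eq_length_filter] at hne
    rw [not_ne_iff] at hne
    constructor
    · rintro hall v (rfl | hv)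
      · exact hne
      · exact hall v hv
    · intro hall v hv; exact hall v (Or.inr hv)
  | case3 i h =>
    simp [List.drop_eq_nil_of_le (by omega : vs.length ≤ i)]

-- on a nondecreasing list, the leading run of the head carries all its occurrences
theorem run_facts (v : Int) (rest : List Int) (hs : (v :: rest).Pairwise (· ≤ ·)) :
    (v :: rest).count v = 1 + (rest.takeWhile (fun y => y == v)).length
    ∧ (∀ z ∈ rest.dropWhile (fun y => y == v),
        (v :: rest).count z = (rest.dropWhile (fun y => y == v)).count z)
    ∧ (rest.dropWhile (fun y => y == v)).Pairwise (· ≤ ·)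
    ∧ ((∀ x ∈ v :: rest, (v :: rest).count x = 6) ↔
        ((v :: rest).count v = 6 ∧
          ∀ z ∈ rest.dropWhile (fun y => y == v),
            (rest.dropWhile (fun y => y == v)).count z = 6)) := by
  rw [List.pairwise_cons] at hs
  obtain ⟨hle, hrest⟩ := hs
  set tk := rest.takeWhile (fun y => y == v) with htk
  set dp := rest.dropWhile (fun y => y == v) with hdp
  have hsplit : rest = tk ++ dp := (List.takeWhile_append_dropWhile).symm
  have htkv : ∀ y ∈ tk, y = v := by
    intro y hy
    simpa using List.mem_takeWhile_imp hy
  have hpdp : dp.Pairwise (· ≤ ·) := hrest.sublist (hdp ▸ List.dropWhile_sublist _)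
  have hdpne : ∀ z ∈ dp, z ≠ v := by
    cases hdph : dp with
    | nil => simp
    | cons hdh hdt =>
      have hne : dp ≠ [] := by rw [hdph]; simp
      have hhead := List.head_dropWhile_not (fun y => y == v) (l := rest) (hdp ▸ hne)
      have hhne' : hdh ≠ v := by
        have : dp.head hne = hdh := by simp [hdph]
        simp only [← hdp] at hhead
        rw [this] at hhead
        simpa using hhead
      have hpdp' := hdph ▸ hpdp
      rw [List.pairwise_cons] at hpdp'
      intro z hz
      rw [List.mem_cons] at hz
      rcases hz with rfl | h1
      · exact hhne'
      · have h2 := hpdp'.1 z h1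
        have h3 : v ≤ hdh := hle hdh (by rw [hsplit, hdph]; simp)
        intro hzv; rw [hzv] at h2
        exact hhne' (le_antisymm h2 h3)
  have hcv : (v :: rest).count v = 1 + tk.length := by
    rw [List.count_cons_self, hsplit, List.count_append]
    have h1 : tk.count v = tk.length := by
      rw [List.count_eq_length.mpr]; intro y hy; rw [htkv y hy]
    have h2 : dp.count v = 0 := by
      rw [List.count_eq_zero]; intro hv; exact hdpne v hv rfl
    omega
  have hcz : ∀ z ∈ dp, (v :: rest).count z = dp.count z := by
    intro z hz
    rw [List.count_cons_of_ne (fun h => hdpne z hz h.symm), hsplit, List.count_append]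
    have : tk.count z = 0 := by
      rw [List.count_eq_zero]; intro hv
      exact hdpne z hz (htkv z hv)
    omega
  refine ⟨hcv, hcz, hpdp, ?_⟩
  constructor
  · intro hall
    refine ⟨hall v List.mem_cons_self, ?_⟩
    intro z hz
    rw [← hcz z hz]
    exact hall z (by rw [hsplit] at *; simp [List.mem_cons]; right; right; simpa using hz)
  · intro ⟨h6, hdall⟩ x hx
    rw [List.mem_cons] at hx
    rcases hx with rfl | hx
    · exact h6
    · rw [hsplit, List.mem_append] at hx
      rcases hx with hx | hx
      · rw [htkv x hx]; exact h6
      · rw [hcz x hx]; exact hdall x hx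

-- B's run-length scan on a nondecreasing list checks 'count = 6' for every element
theorem bScan_eq (s : List Int) (hs : s.Pairwise (· ≤ ·)) :
    bScan s = decide (∀ v ∈ s, s.count v = 6) := by
  fun_induction bScan s with
  | case1 => simp
  | case2 v rest hne =>
    obtain ⟨hcv, -, -, -⟩ := run_facts v rest hs
    rw [eq_comm, decide_eq_false_iff_not]
    intro hall
    have := hall v List.mem_cons_self
    omega
  | case3 v rest hne ih =>
    obtain ⟨hcv, -, hpdp, hiff⟩ := run_facts v rest hs
    rw [not_ne_iff] at hne
    have h6 : (v :: rest).count v = 6 := by omega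
    rw [ih hpdp, decide_eq_decide, hiff]
    simp [h6]

-- ===== VERDICT (by name: the statement is the Claim_ definition above) =====
theorem check_regularity_spec : Claim_equal_check_regularity := by
  intro faces _
  unfold Spec_check_regularity check_regularity check_regularity_alt
  simp only []
  rw [aLoop_eq, bScan_eq _ (PySem.List.sorted_pairwise _ _)]
  rw [List.drop_zero, decide_eq_decide]
  have hperm : (PySem.List.sorted (faces.flatMap (fun face => face.flatMap (fun edge => edge))) (fun x => x) false).Perm
      (faces.flatMap (fun face => face.flatMap (fun edge => edge))) := PySem.List.sorted_perm _ _ _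
  constructor
  · intro hall v hv
    rw [hperm.count_eq]
    exact hall v (by
      rw [PySem.List.mem_sorted, PySem.Set.mem_ofList]
      exact hperm.mem_iff.mp hv)
  · intro hall v hv
    have : v ∈ faces.flatMap (fun face => face.flatMap (fun edge => edge)) := by
      rw [PySem.List.mem_sorted, PySem.Set.mem_ofList] at hv; exact hv
    have := hall v (hperm.mem_iff.mpr this)
    rwa [hperm.count_eq] at this
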